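-- pv_equiv track=rewrite | github.com/akent4000/Universal-Gate-Compiler | nand_optimizer/truth_table.py | _expand_cube_to_ints
-- ===== SOURCE A (Python) =====
-- from typing import Callable, Dict, List, Optional, Set, Tuple
--
-- DASH = -1   # don't-care position in a ternary input cube
--
-- def _expand_cube_to_ints(cube: Tuple[int, ...], n_vars: int) -> List[int]:
--     """Enumerate all minterm integers covered by a ternary cube."""
--     minterms = [0]
--     for i, b in enumerate(cube):
--         bit_pos = n_vars - 1 - i
--         if b == DASH:
--             minterms = minterms + [m | (1 << bit_pos) for m in minterms]
--         elif b == 1: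
--             minterms = [m | (1 << bit_pos) for m in minterms]
--     return minterms
-- ===== SOURCE B (Python) =====
-- DASH = -1   # don't-care position in a ternary input cube
--
-- def _expand_cube_to_ints(cube, n_vars):
--     """Enumerate all minterm integers covered by a ternary cube."""
--     base = 0
--     dash_positions = []
--     for i, b in enumerate(cube):
--         pos = n_vars - 1 - i
--         if b == 1:
--             base |= 1 << pos
--         elif b == DASH:
--             dash_positions.append(pos)
--     result = []
--     for k in range(2 ** len(dash_positions)):
--         m = base
--         for j, pos in enumerate(dash_positions):
--             if (k >> j) & 1:
--                 m |= 1 << pos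
--         result.append(m)
--     return result
-- ===== Notes on version B (the rewrite author's own statement) =====
-- stated objective: alternative
-- what changed: Replaces A's repeated list-doubling (rebuilding the whole minterm list at every dash and 1-bit) with one indexing pass that records the fixed 1-bits (base) and the dash bit-positions, then a single combinatorial pass that enumerates the 2^d dash assignments directly from a counter k, reading bit j of k for the j-th dash.
import Mathlib
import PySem

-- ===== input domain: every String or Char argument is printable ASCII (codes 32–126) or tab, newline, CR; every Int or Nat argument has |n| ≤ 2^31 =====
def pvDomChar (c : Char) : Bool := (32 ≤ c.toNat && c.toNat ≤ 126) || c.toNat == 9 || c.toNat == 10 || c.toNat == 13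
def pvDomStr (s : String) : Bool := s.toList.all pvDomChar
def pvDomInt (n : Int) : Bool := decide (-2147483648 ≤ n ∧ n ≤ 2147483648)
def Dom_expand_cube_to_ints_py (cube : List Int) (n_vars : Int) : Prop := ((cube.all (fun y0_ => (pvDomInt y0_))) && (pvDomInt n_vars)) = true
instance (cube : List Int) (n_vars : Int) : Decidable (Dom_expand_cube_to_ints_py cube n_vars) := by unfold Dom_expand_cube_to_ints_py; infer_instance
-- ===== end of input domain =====

-- Equivalence of the return values of A (list-doubling over the cube) and B (base mask +
-- dash-position table, then direct enumeration of the 2^d combinations by a counter k).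
-- Shift amounts use `.toNat`; this is exact on Pre_ (Python raises on a negative shift, excluded there).

-- ===== PORT A =====
-- loop body of A, named (minterms = state; ib = (i, b) from enumerate(cube))
def aStep (n_vars : Int) (minterms : List Int) (ib : Int × Int) : List Int :=
  let bit_pos : Int := n_vars - 1 - ib.1
  if ib.2 == -1 then minterms ++ minterms.map (fun m => PySem.Int.bor m ((1 : Int) <<< bit_pos.toNat))
  else if ib.2 == 1 then minterms.map (fun m => PySem.Int.bor m ((1 : Int) <<< bit_pos.toNat))
  else minterms

def expand_cube_to_ints_py (cube : List Int) (n_vars : Int) : List Int :=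
  (PySem.List.enumerate cube 0).foldl (aStep n_vars) [0]

-- ===== PORT B =====
-- first pass of B: accumulate (base, dash_positions)
def bAcc (n_vars : Int) (st : Int × List Int) (ib : Int × Int) : Int × List Int :=
  let pos : Int := n_vars - 1 - ib.1
  if ib.2 == 1 then (PySem.Int.bor st.1 ((1 : Int) <<< pos.toNat), st.2)
  else if ib.2 == -1 then (st.1, st.2 ++ [pos])
  else st

-- inner loop of B's second pass: OR in 1<<pos for every dash j whose bit is set in k
def bBit (k : Int) (m : Int) (jp : Int × Int) : Int :=
  if PySem.Int.band (k >>> jp.1.toNat) 1 ≠ 0 then PySem.Int.bor m ((1 : Int) <<< jp.2.toNat) else m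

def expand_cube_to_ints_py_alt (cube : List Int) (n_vars : Int) : List Int :=
  let st := (PySem.List.enumerate cube 0).foldl (bAcc n_vars) (0, [])
  (PySem.List.pyRange 0 ((2 : Int) ^ st.2.length) 1).map
    (fun k => (PySem.List.enumerate st.2 0).foldl (bBit k) st.1)

-- ===== PRECONDITION & SPEC =====
-- Pre_ excludes exactly the inputs where Python raises (ValueError: negative shift count):
-- a cube entry equal to 1 or -1 at an index i with n_vars - 1 - i < 0.
def Pre_expand_cube_to_ints_py (cube : List Int) (n_vars : Int) : Prop :=
  ∀ ib ∈ PySem.List.enumerate cube 0, (ib.2 = 1 ∨ ib.2 = -1) → 0 ≤ n_vars - 1 - ib.1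
instance (cube : List Int) (n_vars : Int) : Decidable (Pre_expand_cube_to_ints_py cube n_vars) := by
  unfold Pre_expand_cube_to_ints_py; infer_instance

def pvWitness_expand_cube_to_ints_py : List Int × Int := ([1, -1, 0], 3)

def Spec_expand_cube_to_ints_py (cube : List Int) (n_vars : Int) (out : List Int) : Prop :=
  out = expand_cube_to_ints_py_alt cube n_vars
instance (cube : List Int) (n_vars : Int) (out : List Int) : Decidable (Spec_expand_cube_to_ints_py cube n_vars out) := by
  unfold Spec_expand_cube_to_ints_py; infer_instance

-- ===== CLAIM (what is proved, stated in full; the proofs are below) =====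
def Claim_equal_expand_cube_to_ints_py : Prop := ∀ (cube : List Int) (n_vars : Int), Dom_expand_cube_to_ints_py cube n_vars → Pre_expand_cube_to_ints_py cube n_vars → Spec_expand_cube_to_ints_py cube n_vars (expand_cube_to_ints_py cube n_vars)

-- ===== LEMMAS AND PROOFS =====

-- B's enumeration stage, as a function of the first-pass state (proof-side name for B's 2nd pass)
def enumB (base : Int) (ds : List Int) : List Int :=
  (PySem.List.pyRange 0 ((2 : Int) ^ ds.length) 1).map
    (fun k => (PySem.List.enumerate ds 0).foldl (bBit k) base)

-- Nat-level model of bBit (all values reached are nonnegative)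
def nBit (k : Nat) (m : Nat) (jp : Int × Int) : Nat :=
  if k / 2 ^ jp.1.toNat % 2 = 1 then m ||| (1 <<< jp.2.toNat) else m

lemma bBit_cast (k m : Nat) (jp : Int × Int) :
    bBit (k : Int) (m : Int) jp = ((nBit k m jp : Nat) : Int) := by
  have h1 : ((k : Int) >>> jp.1.toNat) = ((k >>> jp.1.toNat : Nat) : Int) := rfl
  have h2 : PySem.Int.band ((k >>> jp.1.toNat : Nat) : Int) 1 = (((k >>> jp.1.toNat) &&& 1 : Nat) : Int) := by
    exact_mod_cast PySem.Int.band_natCast _ 1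
  have h3 : ((1 : Int) <<< jp.2.toNat) = ((1 <<< jp.2.toNat : Nat) : Int) := rfl
  rw [bBit, h1, h2, h3]
  rw [nBit]
  have h4 : k >>> jp.1.toNat &&& 1 = k / 2 ^ jp.1.toNat % 2 := by
    rw [Nat.shiftRight_eq_div_pow, Nat.and_one_is_mod]
  rw [h4]
  by_cases hc : k / 2 ^ jp.1.toNat % 2 = 1
  · rw [if_pos hc, if_pos (by exact_mod_cast hc ▸ one_ne_zero), PySem.Int.bor_natCast]
  · have h0 : k / 2 ^ jp.1.toNat % 2 = 0 := by omega
    rw [if_neg hc, h0, if_neg (by simp)]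

lemma foldl_bBit_cast (E : List (Int × Int)) : ∀ (k m : Nat),
    E.foldl (bBit (k : Int)) (m : Int) = ((E.foldl (nBit k) m : Nat) : Int) := by
  induction E with
  | nil => intro k m; rfl
  | cons jp E ih => intro k m; simp only [List.foldl_cons, bBit_cast]; exact ih k _

lemma foldl_nBit_or (E : List (Int × Int)) : ∀ (k m v : Nat),
    E.foldl (nBit k) (m ||| v) = E.foldl (nBit k) m ||| v := by
  induction E with
  | nil => intro k m v; rfl
  | cons jp E ih =>
    intro k m v
    simp only [List.foldl_cons, nBit]
    split
    · have hr : m ||| v ||| 1 <<< jp.2.toNat = m ||| 1 <<< jp.2.toNat ||| v := by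
        rw [Nat.lor_assoc, Nat.lor_assoc, Nat.lor_comm v _]
      rw [hr, ih]
    · exact ih k m v

-- the bit tests of k and k' agree on every index occurring in `enumerate ds 0`
lemma foldl_nBit_congr (ds : List Int) (k k' : Nat)
    (h : ∀ j < ds.length, k / 2 ^ j % 2 = k' / 2 ^ j % 2) (m : Nat) :
    (PySem.List.enumerate ds 0).foldl (nBit k) m = (PySem.List.enumerate ds 0).foldl (nBit k') m := by
  refine PySem.List.foldl_congr_mem _ _ _ _ ?_
  intro acc jp hjp
  rcases (PySem.List.mem_enumerate_iff ds 0 jp).1 hjp with ⟨i, hi, rfl⟩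
  have : ((0 : Int) + (i : Nat)).toNat = i := by omega
  simp only [nBit, this, h i hi]

lemma div_pow_high (k d : Nat) (hk : k < 2 ^ d) : k / 2 ^ d % 2 = 0 := by
  rw [Nat.div_eq_of_lt hk]

lemma div_pow_high_add (k d : Nat) (hk : k < 2 ^ d) : (2 ^ d + k) / 2 ^ d % 2 = 1 := by
  have h3 : (2 ^ d + k) / 2 ^ d = k / 2 ^ d + 1 := by
    rw [Nat.add_comm, Nat.add_div_right _ (Nat.two_pow_pos d)]
  rw [h3, Nat.div_eq_of_lt hk]

lemma div_pow_low_add (k d j : Nat) (hj : j < d) : (2 ^ d + k) / 2 ^ j % 2 = k / 2 ^ j % 2 := by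
  have hdj : 2 ^ d = 2 ^ (d - j - 1) * 2 * 2 ^ j := by
    rw [Nat.mul_assoc, Nat.mul_comm 2 _, ← Nat.pow_succ, ← Nat.pow_add]
    congr 1
    omega
  rw [hdj, Nat.add_comm, Nat.add_mul_div_right _ _ (Nat.two_pow_pos j), Nat.mul_comm _ 2,
    Nat.add_mul_mod_self_left]

-- B's enumeration stage, rewritten over a Nat counter (every value it holds is a cast Nat)
lemma enumB_eq (bn : Nat) (ds : List Int) :
    enumB (bn : Int) ds
      = (List.range (2 ^ ds.length)).map
          (fun n => (((PySem.List.enumerate ds 0).foldl (nBit n) bn : Nat) : Int)) := by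
  unfold enumB
  rw [PySem.List.pyRange_one, List.map_map]
  rw [sub_zero, show ((2 : Int) ^ ds.length) = ((2 ^ ds.length : Nat) : Int) by exact_mod_cast rfl,
    Int.toNat_natCast]
  refine List.map_congr_left ?_
  intro n _
  simp only [Function.comp_apply, zero_add]
  exact foldl_bBit_cast _ n bn

-- appending one dash position doubles B's enumeration exactly the way A's loop body does
lemma enumB_dash (bn : Nat) (ds : List Int) (pos : Int) :
    enumB (bn : Int) (ds ++ [pos])
      = enumB (bn : Int) ds
        ++ (enumB (bn : Int) ds).map (fun m => PySem.Int.bor m ((1 : Int) <<< pos.toNat)) := by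
  rw [enumB_eq, enumB_eq, List.map_map]
  have hlen : (ds ++ [pos]).length = ds.length + 1 := by simp
  rw [hlen, Nat.pow_succ, Nat.mul_two, List.range_add, List.map_append, List.map_map]
  have hE : PySem.List.enumerate (ds ++ [pos]) 0
      = PySem.List.enumerate ds 0 ++ [((ds.length : Int), pos)] := by
    rw [PySem.List.enumerate_append]
    simp [PySem.List.enumerate_cons, PySem.List.enumerate_nil]
  have htoNat : ((ds.length : Int), pos).1.toNat = ds.length := by simp
  congr 1
  · refine List.map_congr_left ?_
    intro n hn
    rw [hE, List.foldl_append, List.foldl_cons, List.foldl_nil]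
    rw [nBit, htoNat, div_pow_high n ds.length (List.mem_range.1 hn), if_neg (by omega)]
  · refine List.map_congr_left ?_
    intro n hn
    simp only [Function.comp_apply]
    rw [hE, List.foldl_append, List.foldl_cons, List.foldl_nil]
    rw [nBit, htoNat, div_pow_high_add n ds.length (List.mem_range.1 hn), if_pos rfl]
    have hcongr : (PySem.List.enumerate ds 0).foldl (nBit (2 ^ ds.length + n)) bn
        = (PySem.List.enumerate ds 0).foldl (nBit n) bn := by
      refine foldl_nBit_congr ds _ _ ?_ bn
      intro j hj
      exact div_pow_low_add n ds.length j hj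
    rw [hcongr]
    exact (PySem.Int.bor_natCast _ _).symm

-- one step: applying A's body to B's enumeration of (base, ds) gives B's enumeration of the updated state
lemma step_eq (n_vars : Int) (ib : Int × Int) (bn : Nat) (ds : List Int) :
    aStep n_vars (enumB (bn : Int) ds) ib
      = enumB ((bAcc n_vars ((bn : Int), ds) ib).1) ((bAcc n_vars ((bn : Int), ds) ib).2) := by
  by_cases hd : ib.2 = -1
  · have h1 : ¬ ib.2 = 1 := by omega
    simp only [aStep, bAcc, hd, beq_iff_eq]
    exact (enumB_dash bn ds (n_vars - 1 - ib.1)).symm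
  · by_cases h1 : ib.2 = 1
    · simp only [aStep, bAcc, h1, beq_iff_eq, reduceIte]
      have hv : ((1 : Int) <<< (n_vars - 1 - ib.1).toNat)
          = ((1 <<< (n_vars - 1 - ib.1).toNat : Nat) : Int) := rfl
      rw [hv, PySem.Int.bor_natCast, enumB_eq, enumB_eq, List.map_map]
      refine List.map_congr_left ?_
      intro n _
      simp only [Function.comp_apply]
      rw [foldl_nBit_or, PySem.Int.bor_natCast]
    · simp only [aStep, bAcc, hd, h1, beq_iff_eq, reduceIte]

lemma main_inv (n_vars : Int) (el : List (Int × Int)) : ∀ (bn : Nat) (ds : List Int),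
    el.foldl (aStep n_vars) (enumB (bn : Int) ds)
      = enumB ((el.foldl (bAcc n_vars) ((bn : Int), ds)).1) ((el.foldl (bAcc n_vars) ((bn : Int), ds)).2) := by
  induction el with
  | nil => intro bn ds; rfl
  | cons ib el ih =>
    intro bn ds
    rw [List.foldl_cons, List.foldl_cons, step_eq]
    by_cases h1 : ib.2 = 1
    · have hb : bAcc n_vars ((bn : Int), ds) ib
          = (((bn ||| 1 <<< (n_vars - 1 - ib.1).toNat : Nat) : Int), ds) := by
        simp [bAcc, h1, ← PySem.Int.bor_natCast]
      rw [hb]; exact ih _ _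
    · by_cases h2 : ib.2 = -1
      · have hb : bAcc n_vars ((bn : Int), ds) ib = ((bn : Int), ds ++ [n_vars - 1 - ib.1]) := by
          simp [bAcc, h2]
        rw [hb]; exact ih _ _
      · have hb : bAcc n_vars ((bn : Int), ds) ib = ((bn : Int), ds) := by
          simp [bAcc, h1, h2]
        rw [hb]; exact ih _ _

-- ===== VERDICT (by name: the statement is the Claim_ definition above) =====
theorem expand_cube_to_ints_py_spec : Claim_equal_expand_cube_to_ints_py := by
  intro cube n_vars _ _
  show expand_cube_to_ints_py cube n_vars = expand_cube_to_ints_py_alt cube n_vars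
  have h0 : expand_cube_to_ints_py_alt cube n_vars
      = enumB (((PySem.List.enumerate cube 0).foldl (bAcc n_vars) (((0 : Nat) : Int), [])).1)
              (((PySem.List.enumerate cube 0).foldl (bAcc n_vars) (((0 : Nat) : Int), [])).2) := rfl
  have h1 : expand_cube_to_ints_py cube n_vars
      = (PySem.List.enumerate cube 0).foldl (aStep n_vars) (enumB (((0 : Nat) : Int)) []) := rfl
  rw [h0, h1, main_inv]
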